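-- pv_equiv track=rewrite | github.com/benjaminwoods/derek | python/src/derek/_parse/_oas2.py | _split_schemas_by_type
-- ===== SOURCE A (Python) =====
-- def _split_schemas_by_type(schemas):
--     """
--     Sort schemas by type.
--
--     Parameters
--     ----------
--     schemas: List[Dict]
--         Subschemas, specified as a list of dictionaries.
--
--     Returns
--     -------
--     Dict
--         A dictionary containing key-value pairs referring to each
--         schema type.
--
--     Examples
--     --------
--
--     For input:
--
--     .. code-block:: python
--
--        [
--          {
--            "type": "integer"
--          },
--          {
--            "type": "string"
--          },
--          {
--            "type": "integer"
--          }
--        ]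
--
--     return:
--
--     .. code-block:: python
--
--        {
--          "integer": [
--            {
--              "type": "integer"
--            },
--            {
--              "type": "integer"
--            }
--          ],
--          "string": [
--            {
--              "type": "string"
--            }
--          ]
--        }
--     """
--
--     collection = {}
--     for s in schemas:
--         subschema_type = s["type"]
--         if subschema_type not in collection:
--             collection[subschema_type] = []
--         collection[subschema_type].append(s)
--     return collection
-- ===== SOURCE B (Python) =====
-- def _split_schemas_by_type(schemas):
--     # Two-pass decomposition: collect the distinct types in first-appearance
--     # order, then build each group with a single filter comprehension.
--     keys = list(dict.fromkeys(s["type"] for s in schemas))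
--     return {t: [s for s in schemas if s["type"] == t] for t in keys}
-- ===== Notes on version B (the rewrite author's own statement) =====
-- stated objective: simpler
-- what changed: Replaces the single mutating-dict accumulation loop by a two-pass decomposition: dedup the type keys in first-appearance order, then build each group by a filter comprehension.
import Mathlib
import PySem

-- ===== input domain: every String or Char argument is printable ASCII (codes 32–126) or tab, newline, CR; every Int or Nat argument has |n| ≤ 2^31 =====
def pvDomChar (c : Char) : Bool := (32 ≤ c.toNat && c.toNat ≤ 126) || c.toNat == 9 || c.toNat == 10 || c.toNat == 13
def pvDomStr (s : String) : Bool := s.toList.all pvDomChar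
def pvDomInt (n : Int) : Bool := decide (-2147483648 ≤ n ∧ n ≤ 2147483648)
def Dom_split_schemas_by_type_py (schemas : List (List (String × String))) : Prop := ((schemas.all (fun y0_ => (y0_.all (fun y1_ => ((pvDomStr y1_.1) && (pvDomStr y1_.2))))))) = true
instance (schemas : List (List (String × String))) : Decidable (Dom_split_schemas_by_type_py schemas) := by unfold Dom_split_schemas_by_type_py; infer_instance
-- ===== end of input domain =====

-- B is a two-pass decomposition (dedup keys, then filter per key) instead of A's
-- single mutating-dict loop; objective: simpler. Equivalence is about the return value.

-- s["type"] : first-match lookup in the schema dict; "" never occurs under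
-- Pre_ (the key is present there; a missing key is a KeyError in Python).
def pvKeyOf (s : List (String × String)) : String :=
  (((s.find? (fun p => p.1 == "type")).map (·.2)).getD "")

-- ===== PORT A =====
def split_schemas_by_type_py (schemas : List (List (String × String))) : List (String × List (List (String × String))) :=
  (schemas.foldl
    (fun collection s =>
      let t := pvKeyOf s
      let collection := if collection.contains t then collection else collection.insert t []
      collection.modify t [] (fun l => l ++ [s]))
    PySem.Dict.empty).items

-- ===== PORT B =====
def split_schemas_by_type_py_alt (schemas : List (List (String × String))) : List (String × List (List (String × String))) :=
  let keys := PySem.Set.ofList (schemas.map pvKeyOf)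
  keys.map (fun t => (t, schemas.filter (fun s => pvKeyOf s == t)))

-- ===== PRECONDITION & SPEC =====
-- Pre_ excludes exactly the inputs where some schema lacks the "type" key: A raises KeyError there.
def Pre_split_schemas_by_type_py (schemas : List (List (String × String))) : Prop :=
  (schemas.all (fun s => s.any (fun p => p.1 == "type"))) = true
instance (schemas : List (List (String × String))) : Decidable (Pre_split_schemas_by_type_py schemas) := by unfold Pre_split_schemas_by_type_py; infer_instance
def pvWitness_split_schemas_by_type_py : (List (List (String × String))) :=
  [[("type", "integer")], [("type", "string")], [("type", "integer")]]

def Spec_split_schemas_by_type_py (schemas : List (List (String × String))) (out : List (String × List (List (String × String)))) : Prop := out = split_schemas_by_type_py_alt schemas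
instance (schemas : List (List (String × String))) (out : List (String × List (List (String × String)))) : Decidable (Spec_split_schemas_by_type_py schemas out) := by unfold Spec_split_schemas_by_type_py; infer_instance

-- ===== CLAIM (what is proved, stated in full; the proofs are below) =====
def Claim_equal_split_schemas_by_type_py : Prop := ∀ (schemas : List (List (String × String))), Dom_split_schemas_by_type_py schemas → Pre_split_schemas_by_type_py schemas → Spec_split_schemas_by_type_py schemas (split_schemas_by_type_py schemas)

-- ===== LEMMAS AND PROOFS =====

-- A's loop body (setdefault-style insert then in-place append) is one modify.
theorem pv_step_eq (d : PySem.Dict String (List (List (String × String)))) (s : List (String × String)) :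
    (let t := pvKeyOf s
     let d' := if d.contains t then d else d.insert t []
     d'.modify t [] (fun l => l ++ [s])) = d.modify (pvKeyOf s) [] (fun l => l ++ [s]) := by
  by_cases h : d.contains (pvKeyOf s) = true
  · simp [h]
  · simp only [Bool.not_eq_true] at h
    have hg : d.getD (pvKeyOf s) [] = [] := PySem.Dict.getD_of_not_contains d [] h
    simp [h, PySem.Dict.modify, PySem.Dict.getD_insert_self,
      PySem.Dict.insert_insert_self, hg]

theorem split_schemas_eq : ∀ (schemas : List (List (String × String))),
    split_schemas_by_type_py schemas = split_schemas_by_type_py_alt schemas := by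
  intro schemas
  unfold split_schemas_by_type_py split_schemas_by_type_py_alt
  have hstep : (fun (d : PySem.Dict String (List (List (String × String)))) s =>
      let t := pvKeyOf s
      let d' := if d.contains t then d else d.insert t []
      d'.modify t [] (fun l => l ++ [s]))
      = fun d s => d.modify (pvKeyOf s) [] (fun l => l ++ [s]) :=
    funext fun d => funext fun s => pv_step_eq d s
  rw [hstep]
  have hmap : schemas.foldl (fun d s => d.modify (pvKeyOf s) [] (fun l => l ++ [s]))
        PySem.Dict.empty
      = (schemas.map (fun s => (pvKeyOf s, s))).foldl
        (fun d p => d.modify p.1 [] (fun x => x ++ [p.2])) PySem.Dict.empty := by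
    rw [List.foldl_map]
  rw [hmap]
  set L := schemas.map (fun s => (pvKeyOf s, s)) with hL
  set D := L.foldl (fun d p => d.modify p.1 [] (fun x => x ++ [p.2])) PySem.Dict.empty with hD
  have hnd : D.keys.Nodup := by
    apply PySem.Dict.nodup_keys_foldl_modify_key
    simp [PySem.Dict.empty, PySem.Dict.keys]
  have hkeys : D.keys = PySem.Set.ofList (schemas.map pvKeyOf) := by
    rw [hD, PySem.Dict.keys_foldl_modify_key L Prod.fst]
    simp [PySem.Dict.empty, PySem.Dict.keys, PySem.Set.update_nil_left, hL, List.map_map, Function.comp_def]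
  have hget : ∀ c, D.getD c [] = schemas.filter (fun s => pvKeyOf s == c) := by
    intro c
    rw [hD, PySem.Dict.getD_foldl_modify_append]
    simp [PySem.Dict.getD_empty, hL, List.filter_map, Function.comp_def, List.map_map]
  rw [PySem.Dict.items_eq_map_keys D hnd [], hkeys]
  simp only [hget]

-- ===== VERDICT (by name: the statement is the Claim_ definition above) =====
theorem split_schemas_by_type_py_spec : Claim_equal_split_schemas_by_type_py := by
  intro schemas _ _
  unfold Spec_split_schemas_by_type_py
  exact split_schemas_eq schemas
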